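-- pv_equiv track=rewrite | github.com/jeffanberg/Coding_Problems | project_euler/problem19.py | advanceWeek
-- ===== SOURCE A (Python) =====
-- def advanceWeek(currentday, num):
--     start = currentday
--     count = 0
--     while count < num:
--         if start == 7:
--             start = 1
--             count += 1
--         else:
--             start += 1
--             count += 1
--     return start
-- ===== SOURCE B (Python) =====
-- def advanceWeek(currentday, num):
--     # Closed-form solution of the recurrence s -> 1 if s == 7 else s + 1:
--     # the value climbs by 1 until it first hits 7, after which it cycles 1..7.
--     if num <= 0:
--         return currentday
--     hit = 7 - currentday  # step index at which the value is exactly 7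
--     if not (0 <= hit < num):
--         return currentday + num
--     return (num - hit - 1) % 7 + 1
-- ===== Notes on version B (the rewrite author's own statement) =====
-- stated objective: faster
-- what changed: Replaced the O(num) step-by-step while loop with an O(1) closed form: compute the step at which the value first hits 7, then reduce the remaining steps mod 7.
import Mathlib
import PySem

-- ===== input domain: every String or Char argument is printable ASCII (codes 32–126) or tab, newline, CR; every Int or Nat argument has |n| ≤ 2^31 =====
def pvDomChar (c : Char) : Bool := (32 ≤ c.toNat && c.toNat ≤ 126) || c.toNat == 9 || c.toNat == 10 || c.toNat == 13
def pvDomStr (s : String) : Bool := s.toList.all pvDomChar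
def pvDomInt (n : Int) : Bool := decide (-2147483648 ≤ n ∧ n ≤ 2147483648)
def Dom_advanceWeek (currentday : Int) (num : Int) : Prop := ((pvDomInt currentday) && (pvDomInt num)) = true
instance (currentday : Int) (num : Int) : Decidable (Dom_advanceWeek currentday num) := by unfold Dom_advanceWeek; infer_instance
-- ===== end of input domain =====

-- B replaces A's O(num) step-by-step while loop with an O(1) closed form of the recurrence.

-- ===== PORT A =====
-- the while loop of A: state (start, count), runs while count < num
def advanceWeekLoop (start : Int) (count : Int) (num : Int) : Int :=
  if count < num then
    if start == 7 then advanceWeekLoop 1 (count + 1) num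
    else advanceWeekLoop (start + 1) (count + 1) num
  else start
termination_by (num - count).toNat
decreasing_by
  all_goals omega

def advanceWeek (currentday : Int) (num : Int) : Int :=
  advanceWeekLoop currentday 0 num

-- ===== PORT B =====
def advanceWeek_alt (currentday : Int) (num : Int) : Int :=
  if num ≤ 0 then currentday
  else
    let hit := 7 - currentday
    if ¬ (0 ≤ hit ∧ hit < num) then currentday + num
    else PySem.Int.mod (num - hit - 1) 7 + 1

-- ===== PRECONDITION & SPEC =====
def Spec_advanceWeek (currentday : Int) (num : Int) (out : Int) : Prop := out = advanceWeek_alt currentday num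
instance (currentday : Int) (num : Int) (out : Int) : Decidable (Spec_advanceWeek currentday num out) := by unfold Spec_advanceWeek; infer_instance

-- ===== CLAIM (what is proved, stated in full; the proofs are below) =====
def Claim_equal_advanceWeek : Prop := ∀ (currentday : Int) (num : Int), Dom_advanceWeek currentday num → Spec_advanceWeek currentday num (advanceWeek currentday num)

-- ===== LEMMAS AND PROOFS =====

-- closed form of A's loop, in terms of the remaining step count k = num - count
def loopClosed (start : Int) (k : Int) : Int :=
  if k ≤ 0 then start
  else if start > 7 then start + k
  else if k ≤ 7 - start then start + k
  else (k - (7 - start) - 1) % 7 + 1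

theorem advanceWeekLoop_eq : ∀ (n : Nat) (start count num : Int),
    (num - count).toNat = n → advanceWeekLoop start count num = loopClosed start (num - count) := by
  intro n
  induction n with
  | zero =>
    intro start count num h
    unfold advanceWeekLoop loopClosed
    have hk : ¬ count < num := by omega
    rw [if_neg hk, if_pos (show num - count ≤ 0 by omega)]
  | succ m ih =>
    intro start count num h
    have hk : count < num := by omega
    unfold advanceWeekLoop
    simp only [hk, if_pos]
    by_cases h7 : start = 7
    · simp only [h7, beq_self_eq_true, if_true]
      rw [ih 1 (count + 1) num (by omega)]
      unfold loopClosed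
      split_ifs <;> omega
    · have : (start == 7) = false := by simpa using h7
      simp only [this, Bool.false_eq_true, if_false]
      rw [ih (start + 1) (count + 1) num (by omega)]
      unfold loopClosed
      split_ifs <;> omega

-- ===== VERDICT (by name: the statement is the Claim_ definition above) =====
theorem advanceWeek_spec : Claim_equal_advanceWeek := by
  intro currentday num _
  unfold Spec_advanceWeek advanceWeek advanceWeek_alt
  rw [advanceWeekLoop_eq (num - 0).toNat currentday 0 num rfl]
  rw [show num - (0:Int) = num by ring]
  simp only [PySem.Int.mod_eq_emod_of_pos (show (0:Int) < 7 by norm_num)]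
  unfold loopClosed
  split_ifs <;> omega
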